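-- pv_equiv track=rewrite | github.com/ProjectPepperHSB/Backend-Services | get-route-data/create_metadata.py | filter_char_location
-- ===== SOURCE A (Python) =====
-- def filter_char_location(string):
--     string = str(string)
--     characters = "[']"
--     for x in range(len(characters)):
--         string = string.replace(characters[x], "")
--     replace = "-"
--     string.replace(replace, "im")
--     return string
-- ===== SOURCE B (Python) =====
-- def filter_char_location(string):
--     return ''.join(c for c in str(string) if c not in "[']")
-- ===== Notes on version B (the rewrite author's own statement) =====
-- stated objective: simpler
-- what changed: Drops the dead no-op replace line and replaces the loop over the three removal characters (three replace passes over the string) by a single filtering pass over the input string's characters, joined at the end.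
import Mathlib
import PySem

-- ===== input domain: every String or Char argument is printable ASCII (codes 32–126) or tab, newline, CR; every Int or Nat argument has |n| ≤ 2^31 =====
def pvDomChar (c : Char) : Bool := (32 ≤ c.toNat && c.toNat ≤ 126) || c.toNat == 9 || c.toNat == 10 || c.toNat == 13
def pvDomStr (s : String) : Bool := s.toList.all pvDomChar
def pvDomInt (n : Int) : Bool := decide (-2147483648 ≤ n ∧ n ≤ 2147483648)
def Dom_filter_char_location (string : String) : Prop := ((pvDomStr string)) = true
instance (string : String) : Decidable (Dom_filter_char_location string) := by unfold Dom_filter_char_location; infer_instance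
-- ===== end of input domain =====

-- B drops A's dead no-op line and does one filtering pass over the string instead of one replace pass per removal character.

-- ===== PORT A =====
def filter_char_location (string : String) : String :=
  -- string = str(string): identity on a str argument
  let characters : String := "[']"
  -- for x in range(len(characters)): string = string.replace(characters[x], "")
  let string :=
    (PySem.List.pyRange 0 (PySem.Str.len characters) 1).foldl
      (fun s x =>
        match PySem.Str.pyGet? characters x with
        | some c => PySem.Str.replace s (String.ofList [c]) ""
        | none => s)  -- unreachable: x ranges over valid indices
      string
  -- replace = "-"; string.replace(replace, "im")  — result discarded (no-op)
  let _ := PySem.Str.replace string "-" "im"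
  string

-- ===== PORT B =====
def filter_char_location_alt (string : String) : String :=
  String.ofList (string.toList.filter (fun c => !("[']".toList.contains c)))

-- ===== PRECONDITION & SPEC =====
def Spec_filter_char_location (string : String) (out : String) : Prop := out = filter_char_location_alt string
instance (string : String) (out : String) : Decidable (Spec_filter_char_location string out) := by unfold Spec_filter_char_location; infer_instance

-- ===== CLAIM (what is proved, stated in full; the proofs are below) =====
def Claim_equal_filter_char_location : Prop := ∀ (string : String), Dom_filter_char_location string → Spec_filter_char_location string (filter_char_location string)

-- ===== LEMMAS AND PROOFS =====

-- replacing a single character by "" is exactly filtering that character out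
theorem replace_go_single (c : Char) (l acc : List Char) (fuel : Nat) (h : l.length ≤ fuel) :
    PySem.Chars.replace.go [c] [] fuel l acc = acc.reverse ++ l.filter (fun d => d != c) := by
  induction l generalizing fuel acc with
  | nil =>
    cases fuel <;> simp [PySem.Chars.replace.go]
  | cons d t ih =>
    cases fuel with
    | zero => simp at h
    | succ n =>
      simp only [PySem.Chars.replace.go]
      by_cases hd : d = c
      · subst hd
        have hpre : List.isPrefixOf [d] (d :: t) = true := by
          simp [List.isPrefixOf]
        simp only [hpre, if_pos]
        have hdrop : List.drop [d].length (d :: t) = t := by simp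
        rw [hdrop, ih _ _ (by simpa using Nat.le_of_succ_le_succ h)]
        simp
      · have hd' : ¬ c = d := fun h => hd h.symm
        rw [if_neg (by simp [List.isPrefixOf, hd']), ih _ _ (by simpa using Nat.le_of_succ_le_succ h)]
        simp [hd]

theorem replace_single_eq_filter (s : String) (c : Char) :
    PySem.Str.replace s (String.ofList [c]) "" =
      String.ofList (s.toList.filter (fun d => d != c)) := by
  unfold PySem.Str.replace PySem.Chars.replace
  have hne : String.ofList [c] ≠ "" := by
    intro h
    have := congrArg String.toList h
    simp at this
  rw [if_neg (by simpa using hne)]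
  simp only [String.toList_ofList]
  have h0 : ("" : String).toList = [] := rfl
  rw [h0, replace_go_single c s.toList [] s.toList.length (le_refl _)]
  simp

-- ===== VERDICT (by name: the statement is the Claim_ definition above) =====
theorem filter_char_location_spec : Claim_equal_filter_char_location := by
  intro string _
  show _ = _
  unfold filter_char_location filter_char_location_alt
  dsimp only
  have hr : PySem.List.pyRange 0 (PySem.Str.len "[']") 1 = [0, 1, 2] := by decide
  rw [hr]
  simp only [List.foldl]
  have h0 : PySem.Str.pyGet? "[']" 0 = some '[' := by decide
  have h1 : PySem.Str.pyGet? "[']" 1 = some '\'' := by decide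
  have h2 : PySem.Str.pyGet? "[']" 2 = some ']' := by decide
  rw [h0, h1, h2]
  simp only [replace_single_eq_filter]
  simp only [String.toList_ofList, List.filter_filter]
  congr 1
  apply List.filter_congr
  intro c _
  rcases Decidable.em (c = '[') with h | h <;> rcases Decidable.em (c = '\'') with h' | h' <;>
    rcases Decidable.em (c = ']') with h'' | h'' <;> simp [h, h', h'']
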